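-- pv_equiv track=rewrite | github.com/jobo215/Desktop-Crypting-App | methods.py | dictFromText
-- ===== SOURCE A (Python) =====
-- def dictFromText(text):
--       combination = {}
--       j = 0
--       keys = []
--       values = []
--       for i in text:
--             if j % 2 == 0:
--                   keys.append(i)
--             else:
--                   values.append(i)
--             j = j + 1
--       for i in range(len(keys)):
--             combination[keys[i]] = values[i]
--       return combination
-- ===== SOURCE B (Python) =====
-- def dictFromText(text):
--     chars = list(text)
--     combination = {}
--     for i in range(0, len(chars), 2):
--         combination[chars[i]] = chars[i + 1]
--     return combination
-- ===== Notes on version B (the rewrite author's own statement) =====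
-- stated objective: simpler
-- what changed: B builds the dict in one stride-2 indexed loop over list(text), eliminating A's partition into separate keys/values lists and its second index-zip loop.
import Mathlib
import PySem

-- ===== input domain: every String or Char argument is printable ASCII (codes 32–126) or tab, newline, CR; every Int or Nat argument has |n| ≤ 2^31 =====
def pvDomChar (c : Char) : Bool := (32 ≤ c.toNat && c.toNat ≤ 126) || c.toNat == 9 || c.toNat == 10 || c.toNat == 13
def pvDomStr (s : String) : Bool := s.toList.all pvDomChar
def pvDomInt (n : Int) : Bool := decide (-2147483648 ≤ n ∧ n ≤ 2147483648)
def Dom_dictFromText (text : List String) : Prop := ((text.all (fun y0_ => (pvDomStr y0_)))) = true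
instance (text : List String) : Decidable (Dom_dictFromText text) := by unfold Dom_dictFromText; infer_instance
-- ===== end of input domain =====

-- B replaces A's partition-into-keys/values-then-zip-by-index structure with a single
-- stride-2 indexed loop that inserts each (text[i], text[i+1]) pair directly (objective: simpler).

-- ===== PORT A =====
def dictFromText (text : List String) : List (String × String) :=
  -- combination = {}; j = 0; keys = []; values = []
  -- for i in text: append i to keys (j % 2 == 0) or to values; j = j + 1
  let st := text.foldl
    (fun (s : Int × List String × List String) i =>
      if PySem.Int.mod s.1 2 == 0 then (s.1 + 1, s.2.1 ++ [i], s.2.2)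
      else (s.1 + 1, s.2.1, s.2.2 ++ [i]))
    (0, [], [])
  let keys := st.2.1
  let values := st.2.2
  -- for i in range(len(keys)): combination[keys[i]] = values[i]
  -- values[i] raises IndexError on odd-length text; Pre_ excludes that, so pyGetD is exact here
  ((PySem.List.pyRange 0 (keys.length : Int) 1).foldl
    (fun (d : PySem.Dict String String) i =>
      d.insert (PySem.List.pyGetD keys i "") (PySem.List.pyGetD values i ""))
    PySem.Dict.empty).items

-- ===== PORT B =====
def dictFromText_alt (text : List String) : List (String × String) :=
  let chars := text
  -- for i in range(0, len(chars), 2): combination[chars[i]] = chars[i + 1]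
  -- chars[i+1] raises IndexError on odd-length text; Pre_ excludes that, so pyGetD is exact here
  ((PySem.List.pyRange 0 (chars.length : Int) 2).foldl
    (fun (d : PySem.Dict String String) i =>
      d.insert (PySem.List.pyGetD chars i "") (PySem.List.pyGetD chars (i + 1) ""))
    PySem.Dict.empty).items

-- ===== PRECONDITION & SPEC =====
-- Pre_ excludes odd-length input, on which A raises IndexError (values[i] past the end); B raises there too.
def Pre_dictFromText (text : List String) : Prop := text.length % 2 = 0
instance (text : List String) : Decidable (Pre_dictFromText text) := by
  unfold Pre_dictFromText; infer_instance
def pvWitness_dictFromText : List String := ["a", "b", "c", "d"]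

def Spec_dictFromText (text : List String) (out : List (String × String)) : Prop :=
  out = dictFromText_alt text
instance (text : List String) (out : List (String × String)) : Decidable (Spec_dictFromText text out) := by
  unfold Spec_dictFromText; infer_instance

-- ===== CLAIM (what is proved, stated in full; the proofs are below) =====
def Claim_equal_dictFromText : Prop :=
  ∀ (text : List String), Dom_dictFromText text → Pre_dictFromText text →
    Spec_dictFromText text (dictFromText text)

-- ===== LEMMAS AND PROOFS =====

-- elements at even positions, at odd positions, and the list of adjacent pairs
def pvEvens : List String → List String
  | [] => []
  | [x] => [x]
  | x :: _ :: r => x :: pvEvens r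

def pvOdds : List String → List String
  | [] => []
  | [_] => []
  | _ :: y :: r => y :: pvOdds r

def pvPairs : List String → List (String × String)
  | [] => []
  | [_] => []
  | x :: y :: r => (x, y) :: pvPairs r

-- A's first loop partitions text into even- and odd-position elements
lemma pv_partition (text : List String) : ∀ (j : Int) (k v : List String),
    PySem.Int.mod j 2 = 0 →
    text.foldl
      (fun (s : Int × List String × List String) i =>
        if PySem.Int.mod s.1 2 == 0 then (s.1 + 1, s.2.1 ++ [i], s.2.2)
        else (s.1 + 1, s.2.1, s.2.2 ++ [i]))
      (j, k, v)
    = (j + text.length, k ++ pvEvens text, v ++ pvOdds text) := by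
  induction text using pvPairs.induct with
  | case1 => simp [pvEvens, pvOdds]
  | case2 x =>
      intro j k v h
      simp only [List.foldl, h]
      simp [pvEvens, pvOdds]
  | case3 x y r ih =>
      intro j k v h
      have h2 : PySem.Int.mod (j+1+1) 2 = 0 := by
        simp [PySem.Int.mod, Int.fmod_eq_emod] at *; omega
      have hdj : (2:ℤ) ∣ j := by
        simp [PySem.Int.mod, Int.fmod_eq_emod] at h; omega
      have hdj1 : ¬ (2:ℤ) ∣ (j+1) := by omega
      norm_num [List.foldl, hdj, hdj1]
      have ih' := ih (j+1+1) (k++[x]) (v++[y]) h2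
      norm_num at ih'
      rw [ih']
      simp [pvEvens, pvOdds]
      ring

-- A's second loop, indexing two equal-length lists, is a fold over their zip
lemma pv_zipfold (ks : List String) : ∀ (vs : List String) (d : PySem.Dict String String),
    vs.length = ks.length →
    (List.range ks.length).foldl
      (fun d k => d.insert (ks.getD k "") (vs.getD k "")) d
    = (ks.zip vs).foldl (fun d p => d.insert p.1 p.2) d := by
  induction ks with
  | nil => intro vs d h; simp
  | cons x ks ih =>
      intro vs d h
      cases vs with
      | nil => simp at h
      | cons y vs =>
          simp only [List.length_cons, List.range_succ_eq_map, List.foldl_cons, List.foldl_map,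
            List.getD_cons_zero, List.zip_cons_cons]
          simp only [Nat.succ_eq_add_one, List.getD_cons_succ]
          exact ih vs _ (by simpa using h)

-- B's stride-2 loop is the same fold over the adjacent pairs
lemma pv_stride (text : List String) : ∀ (d : PySem.Dict String String),
    text.length % 2 = 0 →
    (List.range (text.length / 2)).foldl
      (fun d k => d.insert (text.getD (2*k) "") (text.getD (2*k+1) "")) d
    = (pvPairs text).foldl (fun d p => d.insert p.1 p.2) d := by
  induction text using pvPairs.induct with
  | case1 => intro d h; simp [pvPairs]
  | case2 x => intro d h; simp at h
  | case3 x y r ih =>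
      intro d h
      have hl : (x :: y :: r).length / 2 = r.length / 2 + 1 := by simp; omega
      rw [hl, List.range_succ_eq_map, List.foldl_cons, List.foldl_map]
      simp only [Nat.mul_zero, List.getD_cons_zero, List.getD_cons_succ, pvPairs, List.foldl_cons]
      calc (List.range (r.length / 2)).foldl
            (fun d k => d.insert ((x::y::r).getD (2*(k+1)) "") ((x::y::r).getD (2*(k+1)+1) ""))
            (d.insert x y)
          = (List.range (r.length / 2)).foldl
            (fun d k => d.insert (r.getD (2*k) "") (r.getD (2*k+1) "")) (d.insert x y) := by
            apply PySem.List.foldl_congr_mem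
            intro a k hk
            have e : 2*(k+1) = 2*k+1+1 := by omega
            rw [e]
            simp [List.getElem?_cons_succ]
        _ = (pvPairs r).foldl (fun d p => d.insert p.1 p.2) (d.insert x y) :=
            ih _ (by simp at h ⊢; omega)

lemma pv_zip_evens_odds (text : List String) : text.length % 2 = 0 →
    (pvEvens text).zip (pvOdds text) = pvPairs text := by
  induction text using pvPairs.induct with
  | case1 => intro h; simp [pvEvens, pvOdds, pvPairs]
  | case2 x => intro h; simp at h
  | case3 x y r ih =>
      intro h
      simp only [pvEvens, pvOdds, pvPairs, List.zip_cons_cons]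
      rw [ih (by simp at h ⊢; omega)]

lemma pv_len_evens (text : List String) : text.length % 2 = 0 →
    (pvEvens text).length = text.length / 2 ∧ (pvOdds text).length = text.length / 2 := by
  induction text using pvPairs.induct with
  | case1 => intro h; simp [pvEvens, pvOdds]
  | case2 x => intro h; simp at h
  | case3 x y r ih =>
      intro h
      have h' : r.length % 2 = 0 := by simp at h; omega
      obtain ⟨e, o⟩ := ih h'
      simp [pvEvens, pvOdds, e, o]; omega

-- ===== VERDICT (by name: the statement is the Claim_ definition above) =====
theorem dictFromText_spec : Claim_equal_dictFromText := by
  intro text _ hpre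
  replace hpre : text.length % 2 = 0 := hpre
  unfold Spec_dictFromText
  obtain ⟨he, ho⟩ := pv_len_evens text hpre
  -- A side: partition, then the index loop as a fold over the zip of evens and odds
  unfold dictFromText
  rw [pv_partition text 0 [] [] (by decide)]
  simp only [List.nil_append]
  rw [PySem.List.pyRange_zero_natCast, List.foldl_map]
  simp only [PySem.List.pyGetD_natCast]
  rw [pv_zipfold _ _ _ (by rw [he, ho]), pv_zip_evens_odds text hpre]
  -- B side: the stride-2 loop as the same fold over the adjacent pairs
  rw [show dictFromText_alt text = ((PySem.List.pyRange 0 (text.length : Int) 2).foldl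
    (fun (d : PySem.Dict String String) i =>
      d.insert (PySem.List.pyGetD text i "") (PySem.List.pyGetD text (i + 1) ""))
    PySem.Dict.empty).items from rfl]
  rw [PySem.List.pyRange_of_pos 0 (text.length : Int) (by norm_num), List.foldl_map]
  have hc : (if (0:ℤ) < text.length then (((text.length:ℤ) - 0 + 2 - 1) / 2).toNat else 0)
      = text.length / 2 := by split <;> omega
  rw [hc]
  have hB : ∀ (d : PySem.Dict String String),
      (List.range (text.length / 2)).foldl
        (fun d k => d.insert (PySem.List.pyGetD text (0 + 2*(k:ℤ)) "")
                             (PySem.List.pyGetD text (0 + 2*(k:ℤ) + 1) "")) d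
      = (List.range (text.length / 2)).foldl
        (fun d k => d.insert (text.getD (2*k) "") (text.getD (2*k+1) "")) d := by
    intro d
    apply PySem.List.foldl_congr_mem
    intro a k hk
    have e1 : (0:ℤ) + 2*(k:ℤ) = ((2*k : ℕ) : ℤ) := by push_cast; ring
    rw [e1]
    have e2 : ((2*k : ℕ) : ℤ) + 1 = ((2*k+1 : ℕ) : ℤ) := by push_cast; ring
    rw [e2, PySem.List.pyGetD_natCast, PySem.List.pyGetD_natCast]
  rw [hB, pv_stride text _ hpre]
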